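-- pv_equiv track=rewrite | github.com/mariusfredrichsen/uio | Obliger/Uke 4/fangens_dilemma.py | spill_snilt
-- ===== SOURCE A (Python) =====
-- def spill_snilt(tidligere_trekk):
--     svi = 0
--     sam = 0
--     for i in tidligere_trekk:
--         if i == "svik":
--             svi+=1
--         else:
--             sam+=1
--     if tidligere_trekk == []:
--         return "samarbeid"
--     if svi > sam:
--         return "svik"
--     else:
--         return "samarbeid"
-- ===== SOURCE B (Python) =====
-- def spill_snilt(tidligere_trekk):
--     # Pair-cancellation (Boyer-Moore voting): each move of one class cancels
--     # a stacked move of the other class; whatever class survives won.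
--     stakk = []
--     for trekk in tidligere_trekk:
--         s = (trekk == "svik")
--         if stakk and stakk[-1] != s:
--             stakk.pop()
--         else:
--             stakk.append(s)
--     return "svik" if stakk and stakk[-1] else "samarbeid"
-- ===== Notes on version B (the rewrite author's own statement) =====
-- stated objective: alternative
-- what changed: Replaces the two-counter pass plus majority comparison by a Boyer-Moore-style pair-cancellation stack: opposing moves cancel each other and the surviving class (if any is 'svik') decides, with no counters and no length comparison.
import Mathlib
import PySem

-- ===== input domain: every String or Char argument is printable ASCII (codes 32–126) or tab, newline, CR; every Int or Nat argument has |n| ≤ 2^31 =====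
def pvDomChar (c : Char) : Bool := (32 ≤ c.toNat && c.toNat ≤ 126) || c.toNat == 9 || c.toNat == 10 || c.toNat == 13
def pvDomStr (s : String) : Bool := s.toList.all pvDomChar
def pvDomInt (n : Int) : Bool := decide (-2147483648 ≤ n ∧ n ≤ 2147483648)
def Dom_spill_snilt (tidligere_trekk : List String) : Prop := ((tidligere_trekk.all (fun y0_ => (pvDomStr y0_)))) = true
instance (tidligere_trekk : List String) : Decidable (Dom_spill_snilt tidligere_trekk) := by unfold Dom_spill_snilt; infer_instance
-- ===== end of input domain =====

-- B replaces A's two-counter majority comparison with a pair-cancellation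
-- (Boyer-Moore voting) stack; equivalence of the two is proved below.


-- ===== PORT A =====
-- Port of A: loop accumulating two counters, then empty-check and comparison.
def spill_snilt (tidligere_trekk : List String) : String :=
  let st := tidligere_trekk.foldl
    (fun (p : Int × Int) i => if i = "svik" then (p.1 + 1, p.2) else (p.1, p.2 + 1))
    (0, 0)
  if tidligere_trekk = [] then "samarbeid"
  else if st.1 > st.2 then "svik" else "samarbeid"

-- ===== PORT B =====
-- B: pair-cancellation stack; an opposing move cancels the stack top, a like
-- move is pushed; the surviving class decides. The list head here is the
-- stack top (Python's list end).
def spill_snilt_alt (tidligere_trekk : List String) : String :=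
  let stakk := tidligere_trekk.foldl
    (fun (stakk : List Bool) trekk =>
      let s : Bool := decide (trekk = "svik")
      match stakk with
      | [] => [s]
      | t :: r => if t ≠ s then r else s :: t :: r)
    []
  match stakk with
  | true :: _ => "svik"
  | _ => "samarbeid"

-- ===== PRECONDITION & SPEC =====
def Spec_spill_snilt (tidligere_trekk : List String) (out : String) : Prop := out = spill_snilt_alt tidligere_trekk
instance (tidligere_trekk : List String) (out : String) : Decidable (Spec_spill_snilt tidligere_trekk out) := by unfold Spec_spill_snilt; infer_instance

-- ===== CLAIM (what is proved, stated in full; the proofs are below) =====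
def Claim_equal_spill_snilt : Prop := ∀ (tidligere_trekk : List String), Dom_spill_snilt tidligere_trekk → Spec_spill_snilt tidligere_trekk (spill_snilt tidligere_trekk)

-- ===== LEMMAS AND PROOFS =====

-- the stack is always homogeneous; encode it by its signed balance
def pvToStack (k : Int) : List Bool :=
  if 0 < k then List.replicate k.toNat true else List.replicate (-k).toNat false

lemma step_toStack (k : Int) (s : Bool) :
    (match pvToStack k with
     | [] => [s]
     | t :: r => if t ≠ s then r else s :: t :: r)
      = pvToStack (k + if s then 1 else -1) := by
  rcases lt_trichotomy k 0 with hk | hk | hk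
  · obtain ⟨n, hn⟩ : ∃ n, (-k).toNat = n + 1 := ⟨(-k).toNat - 1, by omega⟩
    have h1 : pvToStack k = false :: List.replicate n false := by
      simp only [pvToStack, if_neg (by omega : ¬ 0 < k), hn, List.replicate_succ]
    cases s
    · have h2 : pvToStack (k + -1) = List.replicate (n + 2) false := by
        simp only [pvToStack, if_neg (by omega : ¬ 0 < k + -1)]
        congr 1; omega
      simp [h1, h2, List.replicate_succ]
    · have h2 : pvToStack (k + 1) = List.replicate n false := by
        simp only [pvToStack, if_neg (by omega : ¬ 0 < k + 1)]
        congr 1; omega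
      simp [h1, h2]
  · subst hk; cases s <;> simp [pvToStack]
  · obtain ⟨n, hn⟩ : ∃ n, k.toNat = n + 1 := ⟨k.toNat - 1, by omega⟩
    have h1 : pvToStack k = true :: List.replicate n true := by
      simp only [pvToStack, if_pos hk, hn, List.replicate_succ]
    cases s
    · have h2 : pvToStack (k + -1) = List.replicate n true := by
        by_cases h : 0 < k + -1
        · simp only [pvToStack, if_pos h]; congr 1; omega
        · have hk1 : k = 1 := by omega
          have hn0 : n = 0 := by omega
          subst hk1
          norm_num [pvToStack, hn0]
      simp [h1, h2]
    · have h2 : pvToStack (k + 1) = List.replicate (n + 2) true := by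
        simp only [pvToStack, if_pos (by omega : (0:Int) < k + 1)]
        congr 1; omega
      simp [h1, h2, List.replicate_succ]

def pvBal (l : List String) : Int :=
  l.foldl (fun b i => b + if decide (i = "svik") then 1 else -1) 0

lemma fold_stack (l : List String) (k : Int) :
    l.foldl
      (fun (stakk : List Bool) trekk =>
        let s : Bool := decide (trekk = "svik")
        match stakk with
        | [] => [s]
        | t :: r => if t ≠ s then r else s :: t :: r)
      (pvToStack k)
      = pvToStack (l.foldl (fun b i => b + if decide (i = "svik") then 1 else -1) k) := by
  induction l generalizing k with
  | nil => rfl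
  | cons h t ih =>
    simp only [List.foldl_cons]
    rw [step_toStack k (decide (h = "svik")), ih]

lemma fold_counts (l : List String) (a b : Int) :
    l.foldl (fun (p : Int × Int) i => if i = "svik" then (p.1 + 1, p.2) else (p.1, p.2 + 1)) (a, b)
      = (a + PySem.List.count l "svik", b + ((l.length : Int) - PySem.List.count l "svik")) := by
  induction l generalizing a b with
  | nil => simp [PySem.List.count]
  | cons h t ih =>
    simp only [List.foldl_cons]
    by_cases hh : h = "svik" <;>
      simp [hh, ih, PySem.List.count] <;> ring_nf

lemma bal_eq (l : List String) (k : Int) :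
    l.foldl (fun b i => b + if decide (i = "svik") then 1 else -1) k
      = k + 2 * PySem.List.count l "svik" - (l.length : Int) := by
  induction l generalizing k with
  | nil => simp [PySem.List.count]
  | cons h t ih =>
    simp only [List.foldl_cons, ih]
    by_cases hh : h = "svik" <;>
      simp only [hh, PySem.List.count, List.count_cons, decide_true, decide_false,
        if_true, if_false, List.length_cons, beq_self_eq_true, beq_iff_eq] <;>
      push_cast <;> ring_nf

lemma count_le_length (l : List String) :
    PySem.List.count l "svik" ≤ (l.length : Int) := by
  simp only [PySem.List.count]
  exact_mod_cast List.countP_le_length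

-- ===== VERDICT (by name: the statement is the Claim_ definition above) =====
theorem spill_snilt_spec : Claim_equal_spill_snilt := by
  intro l _
  show spill_snilt l = spill_snilt_alt l
  unfold spill_snilt spill_snilt_alt
  have h0 : pvToStack 0 = ([] : List Bool) := by simp [pvToStack]
  have hf := fold_stack l 0
  rw [h0] at hf
  simp only [hf, bal_eq, fold_counts, zero_add]
  rcases eq_or_ne l [] with h | h
  · subst h; simp [PySem.List.count, pvToStack]
  · simp only [if_neg h]
    have hle := count_le_length l
    by_cases hcmp : ((PySem.List.count l "svik" : Int)) > (l.length : Int) - PySem.List.count l "svik"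
    · rw [if_pos hcmp]
      have hpos : (0:Int) < 2 * PySem.List.count l "svik" - l.length := by omega
      obtain ⟨n, hn⟩ : ∃ n, ((2 * (PySem.List.count l "svik" : Int) - l.length)).toNat = n + 1 :=
        ⟨((2 * (PySem.List.count l "svik" : Int) - l.length)).toNat - 1, by omega⟩
      have hrep : pvToStack (2 * (PySem.List.count l "svik" : Int) - l.length)
          = true :: List.replicate n true := by
        simp only [pvToStack, if_pos hpos, hn, List.replicate_succ]
      rw [hrep]
    · rw [if_neg hcmp]
      have hnp : ¬ (0:Int) < 2 * PySem.List.count l "svik" - l.length := by omega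
      have hrep : pvToStack (2 * (PySem.List.count l "svik" : Int) - l.length)
          = List.replicate (-(2 * (PySem.List.count l "svik" : Int) - l.length)).toNat false := by
        simp only [pvToStack, if_neg hnp]
      rw [hrep]
      cases hmn : (-(2 * (PySem.List.count l "svik" : Int) - l.length)).toNat with
      | zero => simp
      | succ m => simp [List.replicate_succ]
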